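-- pv_equiv track=rewrite | github.com/PolinaSavelyeva/Exers | Yandex_algorithms_6.0/Homeworks/2/H.py | f
-- ===== SOURCE A (Python) =====
-- def f(n, a):
--     space = 0
--     for i in range(1, n):
--         space += i * a[i]
--     ans = space
--     sums = [0] * n
--     sums[0] = a[0]
--     for i in range(1, n):
--         sums[0] -= a[i]
--     for i in range(1, n):
--         sums[i] = sums[i-1] + 2 * a[i]
--     for i in range(1, n):
--         space = space + sums[i-1]
--         ans = min(ans, space)
--     return (ans)
-- ===== SOURCE B (Python) =====
-- def f(n, a):
--     # Rotation cost k equals sum_i |i-k|*a[i]; split at k into two sides and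
--     # evaluate each rotation independently from prefix-sum arrays (no incremental update).
--     P = [0] * (n + 1)   # P[k] = a[0]+...+a[k-1]
--     Q = [0] * (n + 1)   # Q[k] = 0*a[0]+...+(k-1)*a[k-1]
--     for i in range(n):
--         P[i + 1] = P[i] + a[i]
--         Q[i + 1] = Q[i] + i * a[i]
--     return min(Q[n] - 2 * Q[k] + 2 * k * P[k] - k * P[n] for k in range(n))
-- ===== Notes on version B (the rewrite author's own statement) =====
-- stated objective: alternative
-- what changed: B recognizes the rotation cost at shift k as sum_i |i-k|*a[i], builds two prefix-sum arrays P (sum of a) and Q (weighted sum i*a[i]) in one pass, and takes min over k of the closed-form Q[n]-2Q[k]+2kP[k]-kP[n]; there is no incremental cost update, no delta array, and no running minimum tied to the previous rotation's cost.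
import Mathlib
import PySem

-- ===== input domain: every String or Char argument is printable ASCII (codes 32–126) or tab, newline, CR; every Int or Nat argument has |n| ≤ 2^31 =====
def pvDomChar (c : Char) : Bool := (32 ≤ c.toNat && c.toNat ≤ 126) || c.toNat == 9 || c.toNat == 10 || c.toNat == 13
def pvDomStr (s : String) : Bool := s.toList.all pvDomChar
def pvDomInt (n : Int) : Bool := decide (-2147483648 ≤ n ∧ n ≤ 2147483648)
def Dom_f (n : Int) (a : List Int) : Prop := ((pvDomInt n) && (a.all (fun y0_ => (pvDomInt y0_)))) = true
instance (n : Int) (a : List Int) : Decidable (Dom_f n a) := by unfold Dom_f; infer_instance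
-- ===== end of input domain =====

-- B evaluates each rotation cost independently as a closed form over two prefix-sum arrays (|i-k| split), instead of A's incremental delta-array update; same O(n) cost, a different algorithm.


-- ===== PORT A =====
-- literal transliteration of A; list writes use pySetD / reads pyGetD (exact on Pre_'s in-range indices)
def f (n : Int) (a : List Int) : Int :=
  let space := (PySem.List.pyRange 1 n 1).foldl (fun s i => s + i * PySem.List.pyGetD a i 0) 0
  let ans := space
  let sums : List Int := List.replicate n.toNat 0           -- [0] * n
  let sums := PySem.List.pySetD sums 0 (PySem.List.pyGetD a 0 0)
  let sums := (PySem.List.pyRange 1 n 1).foldl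
      (fun ss i => PySem.List.pySetD ss 0 (PySem.List.pyGetD ss 0 0 - PySem.List.pyGetD a i 0)) sums
  let sums := (PySem.List.pyRange 1 n 1).foldl
      (fun ss i => PySem.List.pySetD ss i (PySem.List.pyGetD ss (i - 1) 0 + 2 * PySem.List.pyGetD a i 0)) sums
  let r := (PySem.List.pyRange 1 n 1).foldl
      (fun (p : Int × Int) i =>
        let s := p.1 + PySem.List.pyGetD sums (i - 1) 0
        (s, min p.2 s)) (space, ans)
  r.2

-- ===== PORT B =====
-- transliteration of Source B: prefix arrays P, Q built in one pass, then min over the per-rotation closed form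
def f_alt (n : Int) (a : List Int) : Int :=
  let P0 : List Int := List.replicate (n + 1).toNat 0
  let Q0 : List Int := List.replicate (n + 1).toNat 0
  let PQ := (PySem.List.pyRange 0 n 1).foldl
      (fun (pq : List Int × List Int) i =>
        (PySem.List.pySetD pq.1 (i + 1) (PySem.List.pyGetD pq.1 i 0 + PySem.List.pyGetD a i 0),
         PySem.List.pySetD pq.2 (i + 1) (PySem.List.pyGetD pq.2 i 0 + i * PySem.List.pyGetD a i 0)))
      (P0, Q0)
  (PySem.List.min? ((PySem.List.pyRange 0 n 1).map (fun k =>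
      PySem.List.pyGetD PQ.2 n 0 - 2 * PySem.List.pyGetD PQ.2 k 0
        + 2 * k * PySem.List.pyGetD PQ.1 k 0 - k * PySem.List.pyGetD PQ.1 n 0))
    (fun y => y)).getD 0

-- ===== PRECONDITION & SPEC =====
-- A raises unless n >= 1 (IndexError assigning sums[0] on [0]*n when n<=0) and n <= len(a) (a[i] for i < n);
-- B raises on the same inputs (IndexError/ValueError of the empty min).
def Pre_f (n : Int) (a : List Int) : Prop := 1 ≤ n ∧ n ≤ a.length
instance (n : Int) (a : List Int) : Decidable (Pre_f n a) := by unfold Pre_f; infer_instance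
def pvWitness_f : Int × List Int := (3, [2, -1, 4])

def Spec_f (n : Int) (a : List Int) (out : Int) : Prop := out = f_alt n a
instance (n : Int) (a : List Int) (out : Int) : Decidable (Spec_f n a out) := by unfold Spec_f; infer_instance

-- ===== CLAIM =====
def Claim_equal_f : Prop := ∀ (n : Int) (a : List Int), Dom_f n a → Pre_f n a → Spec_f n a (f n a)

-- ===== LEMMAS AND PROOFS =====

theorem sum_take_succ_getD (a : List Int) (m : Nat) (hm : m < a.length) :
    (a.take (m + 1)).sum = (a.take m).sum + a.getD m 0 := by
  rw [List.getD_eq_getElem a 0 hm, List.sum_take_succ a m hm]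

def pvW (a : List Int) (m : Nat) : Int := ((List.range m).map (fun k : Nat => (k : Int) * a.getD k 0)).sum

theorem pvW_succ (a : List Int) (m : Nat) :
    pvW a (m + 1) = pvW a m + (m : Int) * a.getD m 0 := by
  simp [pvW, List.range_succ]

-- the rotation cost at shift k, written as B computes it
def pvC (a : List Int) (N : Nat) (k : Int) : Int :=
  pvW a N - 2 * pvW a k.toNat + 2 * k * (a.take k.toNat).sum - k * (a.take N).sum

theorem pvC_zero (a : List Int) (N : Nat) : pvC a N 0 = pvW a N := by
  simp [pvC, pvW]

theorem pvC_step (a : List Int) (N : Nat) (hNa : N ≤ a.length) (i : Int)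
    (h1 : 1 ≤ i) (h2 : i < (N : Int)) :
    pvC a N i - pvC a N (i - 1) = 2 * (a.take i.toNat).sum - (a.take N).sum := by
  obtain ⟨j, rfl⟩ : ∃ j : Nat, i = ((j + 1 : Nat) : Int) :=
    ⟨(i - 1).toNat, by omega⟩
  have hj : j < a.length := by omega
  have e1 : (((j + 1 : Nat) : Int)) - 1 = ((j : Nat) : Int) := by push_cast; ring
  rw [e1]
  simp only [pvC, Int.toNat_natCast]
  rw [pvW_succ a j, sum_take_succ_getD a j hj]
  push_cast
  ring

theorem sum_fold (a : List Int) : ∀ (m : Nat) (c : Int), m ≤ a.length →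
    (PySem.List.pyRange 0 (m : Int) 1).foldl (fun acc i => acc + PySem.List.pyGetD a i 0) c
      = c + (a.take m).sum := by
  intro m
  induction m with
  | zero => intro c _; simp [PySem.List.pyRange_one_eq_nil]
  | succ k ih =>
    intro c hm
    have : ((k + 1 : Nat) : Int) = (k : Int) + 1 := by push_cast; ring
    rw [this, PySem.List.pyRange_one_succ_right (by positivity), List.foldl_append]
    rw [ih c (by omega)]
    simp [sum_take_succ_getD a k (by omega), add_assoc]

theorem space_fold (a : List Int) : ∀ (m : Nat), m ≤ a.length → 1 ≤ m →
    (PySem.List.pyRange 1 (m : Int) 1).foldl (fun s i => s + i * PySem.List.pyGetD a i 0) 0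
      = pvW a m := by
  intro m
  induction m with
  | zero => intro _ h; omega
  | succ k ih =>
    intro hm _
    by_cases hk : k = 0
    · subst hk
      simp [PySem.List.pyRange_one_eq_nil, pvW]
    · have : ((k + 1 : Nat) : Int) = (k : Int) + 1 := by push_cast; ring
      rw [this, PySem.List.pyRange_one_succ_right (by exact_mod_cast Nat.one_le_iff_ne_zero.mpr hk),
        List.foldl_append]
      rw [ih (by omega) (by omega)]
      simp [pvW_succ]

theorem sub_fold (a : List Int) : ∀ (l : List Int) (x : Int) (r : List Int),
    l.foldl (fun ss i => PySem.List.pySetD ss 0 (PySem.List.pyGetD ss 0 0 - PySem.List.pyGetD a i 0)) (x :: r)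
      = (x - (l.map (fun i => PySem.List.pyGetD a i 0)).sum) :: r := by
  intro l
  induction l with
  | nil => intro x r; simp
  | cons y ys ih =>
    intro x r
    simp only [List.foldl_cons, PySem.List.pyGetD_zero_cons]
    rw [show PySem.List.pySetD (x :: r) 0 (x - PySem.List.pyGetD a y 0) = (x - PySem.List.pyGetD a y 0) :: r by
      simp [PySem.List.pySetD_of_nonneg]]
    rw [ih]
    simp only [List.map_cons, List.sum_cons]
    congr 1
    ring

theorem range_map_sum (a : List Int) (m : Nat) (hm : m ≤ a.length) (h1 : 1 ≤ m) :
    ((PySem.List.pyRange 1 (m : Int) 1).map (fun i => PySem.List.pyGetD a i 0)).sum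
      = (a.take m).sum - a.getD 0 0 := by
  have h0 : PySem.List.pyRange 0 (m : Int) 1 = 0 :: PySem.List.pyRange 1 (m : Int) 1 := by
    rw [PySem.List.pyRange_one_cons (by exact_mod_cast h1)]; norm_num
  have hs := sum_fold a m 0 hm
  rw [h0, List.foldl_cons, PySem.List.foldl_add] at hs
  simp only [PySem.List.pyGetD_zero] at hs
  have : a.getD 0 0 = PySem.List.pyGetD a 0 0 := by simp [PySem.List.pyGetD_zero]
  rw [this]
  omega

theorem sums_fold (a : List Int) (T : Int) (N : Nat) (hN : N ≤ a.length) :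
    ∀ (m lo : Nat) (ss : List Int), 1 ≤ lo → lo + m ≤ N → ss.length = N →
    (∀ j : Nat, j < lo → ss.getD j 0 = 2 * (a.take (j + 1)).sum - T) →
    (((PySem.List.pyRange (lo : Int) ((lo : Int) + (m : Int)) 1).foldl
        (fun ss i => PySem.List.pySetD ss i (PySem.List.pyGetD ss (i - 1) 0 + 2 * PySem.List.pyGetD a i 0)) ss).length = N
     ∧ ∀ j : Nat, j < lo + m →
        ((PySem.List.pyRange (lo : Int) ((lo : Int) + (m : Int)) 1).foldl
          (fun ss i => PySem.List.pySetD ss i (PySem.List.pyGetD ss (i - 1) 0 + 2 * PySem.List.pyGetD a i 0)) ss).getD j 0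
          = 2 * (a.take (j + 1)).sum - T) := by
  intro m
  induction m with
  | zero =>
    intro lo ss h1 hlm hlen hinv
    simp only [Nat.cast_zero, add_zero, PySem.List.pyRange_one_eq_nil (le_refl _), List.foldl_nil]
    exact ⟨hlen, fun j hj => hinv j (by omega)⟩
  | succ k ih =>
    intro lo ss h1 hlm hlen hinv
    have hcons : PySem.List.pyRange (lo : Int) ((lo : Int) + ((k + 1 : Nat) : Int)) 1
        = (lo : Int) :: PySem.List.pyRange ((lo : Int) + 1) ((lo : Int) + ((k + 1 : Nat) : Int)) 1 :=
      PySem.List.pyRange_one_cons (by push_cast; omega)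
    rw [hcons, List.foldl_cons]
    have hidx : ((lo : Int) - 1) = ((lo - 1 : Nat) : Int) := by omega
    have hv : PySem.List.pyGetD ss ((lo : Int) - 1) 0 + 2 * PySem.List.pyGetD a (lo : Int) 0
        = 2 * (a.take (lo + 1)).sum - T := by
      rw [hidx]
      simp only [PySem.List.pyGetD_natCast]
      rw [hinv (lo - 1) (by omega)]
      rw [show lo - 1 + 1 = lo by omega]
      rw [sum_take_succ_getD a lo (by omega)]
      ring
    set ss1 := PySem.List.pySetD ss (lo : Int) (PySem.List.pyGetD ss ((lo : Int) - 1) 0 + 2 * PySem.List.pyGetD a (lo : Int) 0) with hss1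
    have hss1' : ss1 = ss.set lo (2 * (a.take (lo + 1)).sum - T) := by
      rw [hss1, hv, PySem.List.pySetD_natCast]
    have hlen1 : ss1.length = N := by rw [hss1']; simp [hlen]
    have hinv1 : ∀ j : Nat, j < lo + 1 → ss1.getD j 0 = 2 * (a.take (j + 1)).sum - T := by
      intro j hj
      rw [hss1']
      have hls : (ss.set lo (2 * (a.take (lo + 1)).sum - T)).length = N := by simp [hlen]
      by_cases hje : j = lo
      · subst hje
        rw [List.getD_eq_getElem _ _ (by omega), List.getElem_set_self (by omega)]
      · rw [List.getD_eq_getElem _ _ (by omega), List.getElem_set_ne (by omega)]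
        rw [← List.getD_eq_getElem _ _ (by omega)]
        exact hinv j (by omega)
    have harith : (lo : Int) + ((k + 1 : Nat) : Int) = ((lo + 1 : Nat) : Int) + ((k : Nat) : Int) := by push_cast; ring
    rw [harith]
    have := ih (lo + 1) ss1 (by omega) (by omega) hlen1 hinv1
    exact ⟨this.1, fun j hj => this.2 j (by omega)⟩

theorem take_one_sum (a : List Int) (h : 1 ≤ a.length) : (a.take 1).sum = a.getD 0 0 := by
  cases a with
  | nil => simp at h
  | cons x xs => simp

-- A's final loop: running cost + running min = fold of min over the cost function
theorem loopA (VA C : Int → Int) : ∀ (m : Nat) (lo s ans : Int),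
    s = C (lo - 1) →
    (∀ i : Int, lo ≤ i → i < lo + m → VA i = C i - C (i - 1)) →
    ((PySem.List.pyRange lo (lo + (m : Int)) 1).foldl
        (fun (p : Int × Int) i =>
          let s := p.1 + VA i
          (s, min p.2 s)) (s, ans)).2
      = (PySem.List.pyRange lo (lo + (m : Int)) 1).foldl (fun r i => min r (C i)) ans := by
  intro m
  induction m with
  | zero =>
    intro lo s ans _ _
    simp [PySem.List.pyRange_one_eq_nil]
  | succ k ih =>
    intro lo s ans hs hVA
    have hcons : PySem.List.pyRange lo (lo + ((k + 1 : Nat) : Int)) 1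
        = lo :: PySem.List.pyRange (lo + 1) (lo + ((k + 1 : Nat) : Int)) 1 :=
      PySem.List.pyRange_one_cons (by push_cast; omega)
    rw [hcons, List.foldl_cons, List.foldl_cons]
    simp only []
    have hs' : s + VA lo = C lo := by
      rw [hVA lo le_rfl (by push_cast; omega), hs]; ring
    rw [hs']
    have harith : lo + ((k + 1 : Nat) : Int) = (lo + 1) + ((k : Nat) : Int) := by push_cast; ring
    rw [harith]
    exact ih (lo + 1) (C lo) (min ans (C lo))
      (by norm_num)
      (fun i hi1 hi2 => hVA i (by omega) (by push_cast at hi2 ⊢; omega))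

-- B's prefix-array build: after the fold, P[j] = sum of a[0..j-1], Q[j] = weighted sum
theorem PQ_fold (a : List Int) (N : Nat) (hNa : N ≤ a.length) :
    ∀ (m lo : Nat) (p q : List Int), lo + m = N → p.length = N + 1 → q.length = N + 1 →
    (∀ j : Nat, j ≤ lo → p.getD j 0 = (a.take j).sum ∧ q.getD j 0 = pvW a j) →
    (((PySem.List.pyRange (lo : Int) (N : Int) 1).foldl
        (fun (pq : List Int × List Int) i =>
          (PySem.List.pySetD pq.1 (i + 1) (PySem.List.pyGetD pq.1 i 0 + PySem.List.pyGetD a i 0),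
           PySem.List.pySetD pq.2 (i + 1) (PySem.List.pyGetD pq.2 i 0 + i * PySem.List.pyGetD a i 0)))
        (p, q)).1.length = N + 1
     ∧ ((PySem.List.pyRange (lo : Int) (N : Int) 1).foldl
        (fun (pq : List Int × List Int) i =>
          (PySem.List.pySetD pq.1 (i + 1) (PySem.List.pyGetD pq.1 i 0 + PySem.List.pyGetD a i 0),
           PySem.List.pySetD pq.2 (i + 1) (PySem.List.pyGetD pq.2 i 0 + i * PySem.List.pyGetD a i 0)))
        (p, q)).2.length = N + 1
     ∧ ∀ j : Nat, j ≤ N →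
        ((PySem.List.pyRange (lo : Int) (N : Int) 1).foldl
          (fun (pq : List Int × List Int) i =>
            (PySem.List.pySetD pq.1 (i + 1) (PySem.List.pyGetD pq.1 i 0 + PySem.List.pyGetD a i 0),
             PySem.List.pySetD pq.2 (i + 1) (PySem.List.pyGetD pq.2 i 0 + i * PySem.List.pyGetD a i 0)))
          (p, q)).1.getD j 0 = (a.take j).sum
        ∧ ((PySem.List.pyRange (lo : Int) (N : Int) 1).foldl
          (fun (pq : List Int × List Int) i =>
            (PySem.List.pySetD pq.1 (i + 1) (PySem.List.pyGetD pq.1 i 0 + PySem.List.pyGetD a i 0),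
             PySem.List.pySetD pq.2 (i + 1) (PySem.List.pyGetD pq.2 i 0 + i * PySem.List.pyGetD a i 0)))
          (p, q)).2.getD j 0 = pvW a j) := by
  intro m
  induction m with
  | zero =>
    intro lo p q hlm hlp hlq hinv
    have hnil : PySem.List.pyRange (lo : Int) (N : Int) 1 = [] :=
      PySem.List.pyRange_one_eq_nil (by omega)
    rw [hnil]
    simp only [List.foldl_nil]
    exact ⟨hlp, hlq, fun j hj => hinv j (by omega)⟩
  | succ k ih =>
    intro lo p q hlm hlp hlq hinv
    have hcons : PySem.List.pyRange (lo : Int) (N : Int) 1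
        = (lo : Int) :: PySem.List.pyRange ((lo : Int) + 1) (N : Int) 1 :=
      PySem.List.pyRange_one_cons (by omega)
    have hcast : ((lo : Int) + 1) = ((lo + 1 : Nat) : Int) := by push_cast; ring
    rw [hcons, hcast, List.foldl_cons]
    -- the step writes index lo+1 into both lists
    have hloA : lo < a.length := by omega
    have hga : PySem.List.pyGetD a (lo : Int) 0 = a.getD lo 0 := by
      simp [PySem.List.pyGetD_natCast]
    have hvp : PySem.List.pyGetD p (lo : Int) 0 + PySem.List.pyGetD a (lo : Int) 0
        = (a.take (lo + 1)).sum := by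
      simp only [PySem.List.pyGetD_natCast, hga]
      rw [(hinv lo le_rfl).1, sum_take_succ_getD a lo hloA]
    have hvq : PySem.List.pyGetD q (lo : Int) 0 + (lo : Int) * PySem.List.pyGetD a (lo : Int) 0
        = pvW a (lo + 1) := by
      simp only [PySem.List.pyGetD_natCast, hga]
      rw [(hinv lo le_rfl).2, pvW_succ]
    have hsetp : PySem.List.pySetD p ((lo : Int) + 1) (PySem.List.pyGetD p (lo : Int) 0 + PySem.List.pyGetD a (lo : Int) 0)
        = p.set (lo + 1) ((a.take (lo + 1)).sum) := by
      rw [hvp, hcast, PySem.List.pySetD_natCast]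
    have hsetq : PySem.List.pySetD q ((lo : Int) + 1) (PySem.List.pyGetD q (lo : Int) 0 + (lo : Int) * PySem.List.pyGetD a (lo : Int) 0)
        = q.set (lo + 1) (pvW a (lo + 1)) := by
      rw [hvq, hcast, PySem.List.pySetD_natCast]
    rw [hsetp, hsetq]
    have hinv1 : ∀ j : Nat, j ≤ lo + 1 →
        (p.set (lo + 1) ((a.take (lo + 1)).sum)).getD j 0 = (a.take j).sum
        ∧ (q.set (lo + 1) (pvW a (lo + 1))).getD j 0 = pvW a j := by
      intro j hj
      have hlp' : (p.set (lo + 1) ((a.take (lo + 1)).sum)).length = N + 1 := by simp [hlp]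
      have hlq' : (q.set (lo + 1) (pvW a (lo + 1))).length = N + 1 := by simp [hlq]
      by_cases hje : j = lo + 1
      · subst hje
        constructor
        · rw [List.getD_eq_getElem _ _ (by omega), List.getElem_set_self (by omega)]
        · rw [List.getD_eq_getElem _ _ (by omega), List.getElem_set_self (by omega)]
      · constructor
        · rw [List.getD_eq_getElem _ _ (by omega), List.getElem_set_ne (by omega),
            ← List.getD_eq_getElem _ _ (by omega)]
          exact (hinv j (by omega)).1
        · rw [List.getD_eq_getElem _ _ (by omega), List.getElem_set_ne (by omega),
            ← List.getD_eq_getElem _ _ (by omega)]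
          exact (hinv j (by omega)).2
    exact ih (lo + 1) _ _ (by omega) (by simp [hlp]) (by simp [hlq]) hinv1

theorem main_eq (n : Int) (a : List Int) (h1 : 1 ≤ n) (h2 : n ≤ a.length) :
    f n a = f_alt n a := by
  have hnN : n = (n.toNat : Int) := by omega
  set N := n.toNat with hNdef
  have hN1 : 1 ≤ N := by omega
  have hNa : N ≤ a.length := by omega
  set T := (a.take N).sum with hT
  simp only [f, f_alt]
  rw [hnN]
  simp only [Int.toNat_natCast]
  -- ===== B side first =====
  rw [show ((N : Int) + 1).toNat = N + 1 by omega]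
  have hPQ := PQ_fold a N hNa N 0 (List.replicate (N + 1) 0) (List.replicate (N + 1) 0)
    (by omega) (by simp) (by simp)
    (by intro j hj
        have : j = 0 := by omega
        subst this
        constructor <;> simp [pvW])
  simp only [Nat.cast_zero] at hPQ
  obtain ⟨hlP, hlQ, hgetPQ⟩ := hPQ
  set R := (PySem.List.pyRange 0 (N : Int) 1).foldl
      (fun (pq : List Int × List Int) i =>
        (PySem.List.pySetD pq.1 (i + 1) (PySem.List.pyGetD pq.1 i 0 + PySem.List.pyGetD a i 0),
         PySem.List.pySetD pq.2 (i + 1) (PySem.List.pyGetD pq.2 i 0 + i * PySem.List.pyGetD a i 0)))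
      (List.replicate (N + 1) 0, List.replicate (N + 1) 0) with hR
  have hmap : (PySem.List.pyRange 0 (N : Int) 1).map (fun k =>
      PySem.List.pyGetD R.2 ((N : Nat) : Int) 0 - 2 * PySem.List.pyGetD R.2 k 0
        + 2 * k * PySem.List.pyGetD R.1 k 0 - k * PySem.List.pyGetD R.1 ((N : Nat) : Int) 0)
      = (PySem.List.pyRange 0 (N : Int) 1).map (pvC a N) := by
    apply List.map_congr_left
    intro k hk
    rw [PySem.List.mem_pyRange_one] at hk
    have hkN : k = ((k.toNat : Nat) : Int) := by omega
    have hQN : PySem.List.pyGetD R.2 ((N : Nat) : Int) 0 = pvW a N := by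
      rw [PySem.List.pyGetD_natCast]; exact (hgetPQ N le_rfl).2
    have hPN : PySem.List.pyGetD R.1 ((N : Nat) : Int) 0 = (a.take N).sum := by
      rw [PySem.List.pyGetD_natCast]; exact (hgetPQ N le_rfl).1
    have hQk : PySem.List.pyGetD R.2 k 0 = pvW a k.toNat := by
      rw [hkN, PySem.List.pyGetD_natCast]; exact (hgetPQ k.toNat (by omega)).2
    have hPk : PySem.List.pyGetD R.1 k 0 = (a.take k.toNat).sum := by
      rw [hkN, PySem.List.pyGetD_natCast]; exact (hgetPQ k.toNat (by omega)).1
    rw [hQN, hPN, hQk, hPk]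
    rw [pvC]
  rw [hmap]
  have hr0 : PySem.List.pyRange 0 (N : Int) 1 = 0 :: PySem.List.pyRange 1 (N : Int) 1 := by
    rw [PySem.List.pyRange_one_cons (by omega)]; norm_num
  rw [hr0, List.map_cons, PySem.List.min?_id_cons, Option.getD_some, pvC_zero, List.foldl_map]
  -- ===== A side =====
  rw [space_fold a N hNa hN1]
  have hrep : List.replicate N (0 : Int) = 0 :: List.replicate (N - 1) 0 := by
    conv_lhs => rw [show N = (N - 1) + 1 by omega]
    simp [List.replicate_succ]
  rw [hrep]
  rw [show PySem.List.pySetD ((0 : Int) :: List.replicate (N - 1) 0) 0 (PySem.List.pyGetD a 0 0)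
      = PySem.List.pyGetD a 0 0 :: List.replicate (N - 1) 0 by simp [PySem.List.pySetD_of_nonneg]]
  rw [sub_fold a]
  rw [range_map_sum a N hNa hN1]
  have hhead : PySem.List.pyGetD a 0 0 - ((a.take N).sum - a.getD 0 0)
      = 2 * (a.take (0 + 1)).sum - T := by
    simp only [PySem.List.pyGetD_zero, zero_add, take_one_sum a (by omega)]
    rw [hT]; ring
  rw [hhead]
  set ss2 : List Int := (2 * (a.take (0 + 1)).sum - T) :: List.replicate (N - 1) 0 with hss2
  have hNsplit : ((N : Nat) : Int) = 1 + ((N - 1 : Nat) : Int) := by omega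
  have hsums := sums_fold a T N hNa (N - 1) 1 ss2 le_rfl (by omega)
    (by rw [hss2]; simp; omega)
    (by intro j hj
        have : j = 0 := by omega
        subst this
        rw [hss2]; simp)
  simp only [Nat.cast_one] at hsums
  rw [hNsplit]
  obtain ⟨hlen3, hget3⟩ := hsums
  set SS := (PySem.List.pyRange 1 (1 + ((N - 1 : Nat) : Int)) 1).foldl
      (fun ss i => PySem.List.pySetD ss i (PySem.List.pyGetD ss (i - 1) 0 + 2 * PySem.List.pyGetD a i 0)) ss2 with hSS
  have hVA : ∀ i : Int, 1 ≤ i → i < 1 + ((N - 1 : Nat) : Int) →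
      PySem.List.pyGetD SS (i - 1) 0 = pvC a N i - pvC a N (i - 1) := by
    intro i hi1 hi2
    have hg : PySem.List.pyGetD SS (i - 1) 0 = 2 * (a.take i.toNat).sum - T := by
      have hj : i - 1 = (((i - 1).toNat : Nat) : Int) := by omega
      rw [hj, PySem.List.pyGetD_natCast, hget3 (i - 1).toNat (by omega),
        show (i - 1).toNat + 1 = i.toNat by omega]
    rw [hg, pvC_step a N hNa i hi1 (by omega), hT]
  rw [loopA (fun i => PySem.List.pyGetD SS (i - 1) 0) (pvC a N) (N - 1) 1 (pvW a N) (pvW a N)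
      (by norm_num [pvC_zero]) hVA]

-- ===== VERDICT (by name: the statement is the Claim_ definition above) =====
theorem f_spec : Claim_equal_f := by
  intro n a _ hp
  show f n a = f_alt n a
  exact main_eq n a hp.1 hp.2
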